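-- pv_equiv track=rewrite | github.com/hweejeon/RadiologyClinicalAI | radiology_ai.py | format_evidence_strength
-- ===== SOURCE A (Python) =====
-- from typing import List, Dict, Any
--
-- def format_evidence_strength(sources: List[Dict]) -> str:
--     """Determine evidence strength based on source types and quality"""
--     if not sources:
--         return "INSUFFICIENT (No reliable sources found)"
--
--     # Count different types of high-quality sources
--     nice_count = sum(1 for s in sources if 'nice.org.uk' in s.get('url', '').lower())
--     nhs_count = sum(1 for s in sources if any(domain in s.get('url', '').lower()
--                                             for domain in ['nhs.uk', 'nhsengland.nhs.uk']))
--     uk_guidelines = sum(1 for s in sources if any(domain in s.get('url', '').lower()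
--                                                 for domain in ['sign.ac.uk', 'rcr.ac.uk', 'boa.ac.uk']))
--
--     cochrane_count = sum(1 for s in sources if 'cochrane' in s.get('url', '').lower())
--
--     european_guidelines = sum(1 for s in sources if any(domain in s.get('url', '').lower()
--                                                       for domain in ['eular.org', 'myesr.org', 'essr.org']))
--
--     american_guidelines = sum(1 for s in sources if any(domain in s.get('url', '').lower()
--                                                       for domain in ['acr.org', 'aaos.org', 'aossm.org']))
--
--     systematic_review_count = sum(1 for s in sources if any(term in s.get('content', '').lower()
--                                                           for term in ['systematic review', 'meta-analysis', 'consensus statement']))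
--
--     high_impact_journals = sum(1 for s in sources if any(domain in s.get('url', '').lower()
--                                                        for domain in ['bmj.com', 'thelancet.com', 'nejm.org']))
--
--     total_authoritative = nice_count + nhs_count + uk_guidelines + cochrane_count + european_guidelines + american_guidelines
--
--     # Determine strength based on source quality and quantity
--     if nice_count >= 2 or (nice_count >= 1 and nhs_count >= 1):
--         return f"VERY STRONG (NICE Guidelines: {nice_count}, NHS: {nhs_count})"
--     elif nice_count >= 1 or cochrane_count >= 1:
--         return f"STRONG (NICE: {nice_count}, Cochrane: {cochrane_count})"
--     elif total_authoritative >= 3: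
--         return f"STRONG (Multiple Guidelines: UK:{uk_guidelines}, EU:{european_guidelines}, US:{american_guidelines})"
--     elif total_authoritative >= 2 or systematic_review_count >= 2:
--         return f"MODERATE (Guidelines: {total_authoritative}, Systematic Reviews: {systematic_review_count})"
--     elif total_authoritative >= 1 or high_impact_journals >= 2:
--         return f"MODERATE (Authoritative Sources: {total_authoritative}, High-Impact Journals: {high_impact_journals})"
--     elif len(sources) >= 5:
--         return f"WEAK (Multiple Sources: {len(sources)}, but limited authoritative guidelines)"
--     elif len(sources) >= 1:
--         return f"WEAK (Limited Sources: {len(sources)})"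
--     else:
--         return "INSUFFICIENT (No reliable sources found)"
-- ===== SOURCE B (Python) =====
-- def format_evidence_strength(sources):
--     """Determine evidence strength based on source types and quality"""
--     if not sources:
--         return "INSUFFICIENT (No reliable sources found)"
--
--     # One pass over sources: lowercase url/content once, bump every matching counter.
--     nice_count = nhs_count = uk_guidelines = cochrane_count = 0
--     european_guidelines = american_guidelines = 0
--     systematic_review_count = high_impact_journals = 0
--     for s in sources:
--         url = s.get('url', '').lower()
--         content = s.get('content', '').lower()
--         if 'nice.org.uk' in url:
--             nice_count += 1
--         if 'nhs.uk' in url or 'nhsengland.nhs.uk' in url: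
--             nhs_count += 1
--         if 'sign.ac.uk' in url or 'rcr.ac.uk' in url or 'boa.ac.uk' in url:
--             uk_guidelines += 1
--         if 'cochrane' in url:
--             cochrane_count += 1
--         if 'eular.org' in url or 'myesr.org' in url or 'essr.org' in url:
--             european_guidelines += 1
--         if 'acr.org' in url or 'aaos.org' in url or 'aossm.org' in url:
--             american_guidelines += 1
--         if ('systematic review' in content or 'meta-analysis' in content
--                 or 'consensus statement' in content):
--             systematic_review_count += 1
--         if 'bmj.com' in url or 'thelancet.com' in url or 'nejm.org' in url:
--             high_impact_journals += 1
--
--     total_authoritative = (nice_count + nhs_count + uk_guidelines + cochrane_count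
--                            + european_guidelines + american_guidelines)
--
--     if nice_count >= 2 or (nice_count >= 1 and nhs_count >= 1):
--         return f"VERY STRONG (NICE Guidelines: {nice_count}, NHS: {nhs_count})"
--     elif nice_count >= 1 or cochrane_count >= 1:
--         return f"STRONG (NICE: {nice_count}, Cochrane: {cochrane_count})"
--     elif total_authoritative >= 3:
--         return f"STRONG (Multiple Guidelines: UK:{uk_guidelines}, EU:{european_guidelines}, US:{american_guidelines})"
--     elif total_authoritative >= 2 or systematic_review_count >= 2:
--         return f"MODERATE (Guidelines: {total_authoritative}, Systematic Reviews: {systematic_review_count})"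
--     elif total_authoritative >= 1 or high_impact_journals >= 2:
--         return f"MODERATE (Authoritative Sources: {total_authoritative}, High-Impact Journals: {high_impact_journals})"
--     elif len(sources) >= 5:
--         return f"WEAK (Multiple Sources: {len(sources)}, but limited authoritative guidelines)"
--     else:
--         return f"WEAK (Limited Sources: {len(sources)})"
-- ===== Notes on version B (the rewrite author's own statement) =====
-- stated objective: alternative
-- what changed: Replaces A's eight independent comprehension passes over sources with a single fold that lowercases each source's url/content once and increments all eight counters per source; the decision cascade is unchanged.
import Mathlib
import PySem

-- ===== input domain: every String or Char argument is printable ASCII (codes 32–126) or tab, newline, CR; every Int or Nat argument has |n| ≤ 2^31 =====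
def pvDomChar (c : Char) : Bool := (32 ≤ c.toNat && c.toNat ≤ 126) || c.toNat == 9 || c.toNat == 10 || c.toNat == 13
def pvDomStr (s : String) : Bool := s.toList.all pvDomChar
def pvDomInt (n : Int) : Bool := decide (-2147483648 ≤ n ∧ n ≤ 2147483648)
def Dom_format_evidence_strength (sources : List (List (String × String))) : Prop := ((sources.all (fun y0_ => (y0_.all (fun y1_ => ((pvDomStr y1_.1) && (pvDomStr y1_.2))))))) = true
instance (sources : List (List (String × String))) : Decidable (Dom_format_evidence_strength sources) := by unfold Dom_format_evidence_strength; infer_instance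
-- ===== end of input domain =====

-- B replaces A's eight separate comprehension passes over `sources` by a single fold that
-- lowercases each source's url/content once and bumps all eight counters (objective: alternative).


-- ===== PORT A =====
-- s.get('url', '').lower()  /  s.get('content', '').lower()
def pvUrlOf (s : List (String × String)) : String :=
  PySem.Str.lower ((PySem.Dict.mk s).getD "url" "")
def pvContentOf (s : List (String × String)) : String :=
  PySem.Str.lower ((PySem.Dict.mk s).getD "content" "")

def format_evidence_strength (sources : List (List (String × String))) : String :=
  if sources = [] then "INSUFFICIENT (No reliable sources found)"
  else
    let nice_count : Int := (sources.map (fun s =>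
      if PySem.Str.isIn "nice.org.uk" (pvUrlOf s) then (1:Int) else 0)).sum
    let nhs_count : Int := (sources.map (fun s =>
      if ["nhs.uk", "nhsengland.nhs.uk"].any (fun d => PySem.Str.isIn d (pvUrlOf s)) then (1:Int) else 0)).sum
    let uk_guidelines : Int := (sources.map (fun s =>
      if ["sign.ac.uk", "rcr.ac.uk", "boa.ac.uk"].any (fun d => PySem.Str.isIn d (pvUrlOf s)) then (1:Int) else 0)).sum
    let cochrane_count : Int := (sources.map (fun s =>
      if PySem.Str.isIn "cochrane" (pvUrlOf s) then (1:Int) else 0)).sum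
    let european_guidelines : Int := (sources.map (fun s =>
      if ["eular.org", "myesr.org", "essr.org"].any (fun d => PySem.Str.isIn d (pvUrlOf s)) then (1:Int) else 0)).sum
    let american_guidelines : Int := (sources.map (fun s =>
      if ["acr.org", "aaos.org", "aossm.org"].any (fun d => PySem.Str.isIn d (pvUrlOf s)) then (1:Int) else 0)).sum
    let systematic_review_count : Int := (sources.map (fun s =>
      if ["systematic review", "meta-analysis", "consensus statement"].any (fun t => PySem.Str.isIn t (pvContentOf s)) then (1:Int) else 0)).sum
    let high_impact_journals : Int := (sources.map (fun s =>
      if ["bmj.com", "thelancet.com", "nejm.org"].any (fun d => PySem.Str.isIn d (pvUrlOf s)) then (1:Int) else 0)).sum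
    let total_authoritative : Int := nice_count + nhs_count + uk_guidelines + cochrane_count + european_guidelines + american_guidelines
    if nice_count ≥ 2 ∨ (nice_count ≥ 1 ∧ nhs_count ≥ 1) then
      "VERY STRONG (NICE Guidelines: " ++ PySem.Int.toStr nice_count ++ ", NHS: " ++ PySem.Int.toStr nhs_count ++ ")"
    else if nice_count ≥ 1 ∨ cochrane_count ≥ 1 then
      "STRONG (NICE: " ++ PySem.Int.toStr nice_count ++ ", Cochrane: " ++ PySem.Int.toStr cochrane_count ++ ")"
    else if total_authoritative ≥ 3 then
      "STRONG (Multiple Guidelines: UK:" ++ PySem.Int.toStr uk_guidelines ++ ", EU:" ++ PySem.Int.toStr european_guidelines ++ ", US:" ++ PySem.Int.toStr american_guidelines ++ ")"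
    else if total_authoritative ≥ 2 ∨ systematic_review_count ≥ 2 then
      "MODERATE (Guidelines: " ++ PySem.Int.toStr total_authoritative ++ ", Systematic Reviews: " ++ PySem.Int.toStr systematic_review_count ++ ")"
    else if total_authoritative ≥ 1 ∨ high_impact_journals ≥ 2 then
      "MODERATE (Authoritative Sources: " ++ PySem.Int.toStr total_authoritative ++ ", High-Impact Journals: " ++ PySem.Int.toStr high_impact_journals ++ ")"
    else if (sources.length : Int) ≥ 5 then
      "WEAK (Multiple Sources: " ++ PySem.Int.toStr (sources.length : Int) ++ ", but limited authoritative guidelines)"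
    else if (sources.length : Int) ≥ 1 then
      "WEAK (Limited Sources: " ++ PySem.Int.toStr (sources.length : Int) ++ ")"
    else "INSUFFICIENT (No reliable sources found)"

-- ===== PORT B =====
-- loop body of Source B: lowercase url/content once, bump each matching counter
def pvStep (acc : Int × Int × Int × Int × Int × Int × Int × Int)
    (s : List (String × String)) : Int × Int × Int × Int × Int × Int × Int × Int :=
  let url := PySem.Str.lower ((PySem.Dict.mk s).getD "url" "")
  let content := PySem.Str.lower ((PySem.Dict.mk s).getD "content" "")
  let (nice, nhs, uk, coch, eu, us, sys, hij) := acc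
  ((if PySem.Str.isIn "nice.org.uk" url then nice + 1 else nice),
   (if PySem.Str.isIn "nhs.uk" url || PySem.Str.isIn "nhsengland.nhs.uk" url then nhs + 1 else nhs),
   (if PySem.Str.isIn "sign.ac.uk" url || PySem.Str.isIn "rcr.ac.uk" url || PySem.Str.isIn "boa.ac.uk" url then uk + 1 else uk),
   (if PySem.Str.isIn "cochrane" url then coch + 1 else coch),
   (if PySem.Str.isIn "eular.org" url || PySem.Str.isIn "myesr.org" url || PySem.Str.isIn "essr.org" url then eu + 1 else eu),
   (if PySem.Str.isIn "acr.org" url || PySem.Str.isIn "aaos.org" url || PySem.Str.isIn "aossm.org" url then us + 1 else us),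
   (if PySem.Str.isIn "systematic review" content || PySem.Str.isIn "meta-analysis" content || PySem.Str.isIn "consensus statement" content then sys + 1 else sys),
   (if PySem.Str.isIn "bmj.com" url || PySem.Str.isIn "thelancet.com" url || PySem.Str.isIn "nejm.org" url then hij + 1 else hij))

def format_evidence_strength_alt (sources : List (List (String × String))) : String :=
  if sources = [] then "INSUFFICIENT (No reliable sources found)"
  else
    let (nice_count, nhs_count, uk_guidelines, cochrane_count, european_guidelines,
         american_guidelines, systematic_review_count, high_impact_journals) :=
      sources.foldl pvStep (0, 0, 0, 0, 0, 0, 0, 0)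
    let total_authoritative : Int := nice_count + nhs_count + uk_guidelines + cochrane_count + european_guidelines + american_guidelines
    if nice_count ≥ 2 ∨ (nice_count ≥ 1 ∧ nhs_count ≥ 1) then
      "VERY STRONG (NICE Guidelines: " ++ PySem.Int.toStr nice_count ++ ", NHS: " ++ PySem.Int.toStr nhs_count ++ ")"
    else if nice_count ≥ 1 ∨ cochrane_count ≥ 1 then
      "STRONG (NICE: " ++ PySem.Int.toStr nice_count ++ ", Cochrane: " ++ PySem.Int.toStr cochrane_count ++ ")"
    else if total_authoritative ≥ 3 then
      "STRONG (Multiple Guidelines: UK:" ++ PySem.Int.toStr uk_guidelines ++ ", EU:" ++ PySem.Int.toStr european_guidelines ++ ", US:" ++ PySem.Int.toStr american_guidelines ++ ")"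
    else if total_authoritative ≥ 2 ∨ systematic_review_count ≥ 2 then
      "MODERATE (Guidelines: " ++ PySem.Int.toStr total_authoritative ++ ", Systematic Reviews: " ++ PySem.Int.toStr systematic_review_count ++ ")"
    else if total_authoritative ≥ 1 ∨ high_impact_journals ≥ 2 then
      "MODERATE (Authoritative Sources: " ++ PySem.Int.toStr total_authoritative ++ ", High-Impact Journals: " ++ PySem.Int.toStr high_impact_journals ++ ")"
    else if (sources.length : Int) ≥ 5 then
      "WEAK (Multiple Sources: " ++ PySem.Int.toStr (sources.length : Int) ++ ", but limited authoritative guidelines)"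
    else
      "WEAK (Limited Sources: " ++ PySem.Int.toStr (sources.length : Int) ++ ")"

-- ===== PRECONDITION & SPEC =====
def Spec_format_evidence_strength (sources : List (List (String × String))) (out : String) : Prop := out = format_evidence_strength_alt sources
instance (sources : List (List (String × String))) (out : String) : Decidable (Spec_format_evidence_strength sources out) := by unfold Spec_format_evidence_strength; infer_instance

-- ===== CLAIM (what is proved, stated in full; the proofs are below) =====
def Claim_equal_format_evidence_strength : Prop := ∀ (sources : List (List (String × String))), Dom_format_evidence_strength sources → Spec_format_evidence_strength sources (format_evidence_strength sources)

-- ===== LEMMAS AND PROOFS =====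

-- The single fold of B computes exactly the eight comprehension sums of A, shifted by the initial accumulator.
set_option maxHeartbeats 1600000 in
theorem pvStep_fold_eq (sources : List (List (String × String)))
    (c1 c2 c3 c4 c5 c6 c7 c8 : Int) :
    sources.foldl pvStep (c1, c2, c3, c4, c5, c6, c7, c8) =
      (c1 + (sources.map (fun s => if PySem.Str.isIn "nice.org.uk" (pvUrlOf s) then (1:Int) else 0)).sum,
       c2 + (sources.map (fun s => if ["nhs.uk", "nhsengland.nhs.uk"].any (fun d => PySem.Str.isIn d (pvUrlOf s)) then (1:Int) else 0)).sum,
       c3 + (sources.map (fun s => if ["sign.ac.uk", "rcr.ac.uk", "boa.ac.uk"].any (fun d => PySem.Str.isIn d (pvUrlOf s)) then (1:Int) else 0)).sum,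
       c4 + (sources.map (fun s => if PySem.Str.isIn "cochrane" (pvUrlOf s) then (1:Int) else 0)).sum,
       c5 + (sources.map (fun s => if ["eular.org", "myesr.org", "essr.org"].any (fun d => PySem.Str.isIn d (pvUrlOf s)) then (1:Int) else 0)).sum,
       c6 + (sources.map (fun s => if ["acr.org", "aaos.org", "aossm.org"].any (fun d => PySem.Str.isIn d (pvUrlOf s)) then (1:Int) else 0)).sum,
       c7 + (sources.map (fun s => if ["systematic review", "meta-analysis", "consensus statement"].any (fun t => PySem.Str.isIn t (pvContentOf s)) then (1:Int) else 0)).sum,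
       c8 + (sources.map (fun s => if ["bmj.com", "thelancet.com", "nejm.org"].any (fun d => PySem.Str.isIn d (pvUrlOf s)) then (1:Int) else 0)).sum) := by
  induction sources generalizing c1 c2 c3 c4 c5 c6 c7 c8 with
  | nil => simp
  | cons s rest ih =>
    simp only [List.foldl_cons, pvStep]
    rw [ih]
    simp only [pvUrlOf, pvContentOf, List.map_cons, List.sum_cons,
      List.any_cons, List.any_nil, Bool.or_false, Bool.or_assoc, Prod.mk.injEq]
    refine ⟨?_, ?_, ?_, ?_, ?_, ?_, ?_, ?_⟩ <;> split_ifs <;> ring_nf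

-- ===== VERDICT (by name: the statement is the Claim_ definition above) =====
set_option maxHeartbeats 1600000 in
theorem format_evidence_strength_spec : Claim_equal_format_evidence_strength := by
  intro sources _
  unfold Spec_format_evidence_strength format_evidence_strength format_evidence_strength_alt
  by_cases h : sources = []
  · subst h; rfl
  · have hlen : (sources.length : Int) ≥ 1 := by
      have := List.length_pos_iff.mpr h
      omega
    rw [if_neg h, if_neg h, pvStep_fold_eq]
    simp only [zero_add, List.any_cons, List.any_nil, Bool.or_false, if_pos hlen]
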